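-- pv_equiv track=rewrite | github.com/udayhacks/leetcode | greedy_dp.py | func
-- ===== SOURCE A (Python) =====
-- def func(arr):
--
--     mx = 0
--     n = len(arr)
--
--     for i in range(len(arr)) :
--         mx = max(arr[i:i+arr[i]])
--         if mx > n-1:
--             return False
--
--     return True
-- ===== SOURCE B (Python) =====
-- def func(arr):
--     n = len(arr)
--     return all(x <= n - 1 for x in arr)
-- ===== Notes on version B (the rewrite author's own statement) =====
-- stated objective: faster
-- what changed: Replaces the per-index slice-and-max scan with a single linear pass comparing every element with n-1 (equivalent because every nonempty slice arr[i:i+arr[i]] starts at index i, so each element is the head of its own slice); intended as faster (O(n^2) worst case vs O(n)): a timing run measured B 38x-178x faster where both finished, though A timed out on most largest-size inputs so the harness records the speed-up as unconfirmed.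
import Mathlib
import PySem

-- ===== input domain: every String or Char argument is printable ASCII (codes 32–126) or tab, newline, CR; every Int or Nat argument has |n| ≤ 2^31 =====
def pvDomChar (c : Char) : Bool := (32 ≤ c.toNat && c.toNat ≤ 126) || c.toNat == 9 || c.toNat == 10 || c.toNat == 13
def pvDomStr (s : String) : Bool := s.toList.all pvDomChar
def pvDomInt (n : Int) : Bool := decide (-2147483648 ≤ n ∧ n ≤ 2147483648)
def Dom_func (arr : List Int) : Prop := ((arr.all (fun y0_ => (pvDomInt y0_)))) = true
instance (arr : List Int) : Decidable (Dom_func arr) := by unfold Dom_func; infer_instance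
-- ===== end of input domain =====

-- B replaces A's per-index slice-and-max scan by one linear pass comparing every element with
-- n-1 (equivalent because every nonempty slice arr[i:i+arr[i]] starts at index i); intended as
-- faster: a timing run measured B 38x-178x faster where both finished (unconfirmed at the
-- largest size, where A timed out on most inputs).

-- ===== PORT A =====
-- literal port of A's loop: for i in range(len(arr)): mx = max(arr[i:i+arr[i]]); if mx > n-1: return False
-- (max() of an empty slice raises ValueError in Python; the port's `.getD 0` there is outside Pre_func)
def funcGo (arr : List Int) (n : Int) : List Int → Bool
  | [] => true
  | i :: rest =>
    let v := PySem.List.pyGetD arr i 0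
    let mx := (PySem.List.max? (PySem.List.slice arr (some i) (some (i + v))) (fun x => x)).getD 0
    if mx > n - 1 then false else funcGo arr n rest

def func (arr : List Int) : Bool :=
  funcGo arr (PySem.List.len arr) (PySem.List.pyRange 0 (PySem.List.len arr) 1)

-- ===== PORT B =====
def func_alt (arr : List Int) : Bool :=
  let n := PySem.List.len arr
  arr.all (fun x => decide (x ≤ n - 1))

-- ===== PRECONDITION & SPEC =====
-- pvCond arr i ↔ the slice arr[i:i+arr[i]] is nonempty (so max() does not raise at i)
abbrev pvCond (arr : List Int) (i : Nat) : Prop :=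
  1 ≤ arr.getD i 0 ∨ ((i : Int) + arr.getD i 0 < 0 ∧ 0 < (arr.length : Int) + arr.getD i 0)

-- pvTrig arr j ↔ the slice arr[j:j+arr[j]] contains an element > n-1 (A returns False at j)
abbrev pvTrig (arr : List Int) (j : Nat) : Prop :=
  ∃ x ∈ PySem.List.slice arr (some (j : Int)) (some ((j : Int) + arr.getD j 0)),
    (arr.length : Int) - 1 < x

-- Pre_func is exactly the set of inputs on which A returns normally: every index whose slice
-- is empty (where max() would raise ValueError) is preceded by an index whose slice already
-- contains an element > n-1, so A returns False before reaching it.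
def Pre_func (arr : List Int) : Prop :=
  ∀ b : Nat, b < arr.length → pvCond arr b ∨ ∃ j : Nat, j < b ∧ pvTrig arr j
instance (arr : List Int) : Decidable (Pre_func arr) := by unfold Pre_func; infer_instance

def pvWitness_func : List Int := ([1])

def Spec_func (arr : List Int) (out : Bool) : Prop := out = func_alt arr
instance (arr : List Int) (out : Bool) : Decidable (Spec_func arr out) := by unfold Spec_func; infer_instance

-- ===== CLAIM (what is proved, stated in full; the proofs are below) =====
def Claim_equal_func : Prop := ∀ (arr : List Int), Dom_func arr → Pre_func arr → Spec_func arr (func arr)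

-- ===== LEMMAS AND PROOFS =====

-- If the slice at i is nonempty (pvCond), it is a nonempty prefix of arr.drop i.
lemma pv_slice_shape (arr : List Int) (i : Nat) (hi : i < arr.length) (hc : pvCond arr i) :
    ∃ k : Nat, PySem.List.slice arr (some (i : Int)) (some ((i : Int) + arr.getD i 0))
      = (arr.drop i).take (k + 1) := by
  rcases hc with hv1 | ⟨hneg, hpos⟩
  · refine ⟨min ((i : Int) + arr.getD i 0).toNat arr.length - i - 1, ?_⟩
    simp only [PySem.List.slice, PySem.List.clampIdx]
    rw [if_neg (by omega : ¬ ((i : Int) < 0)), if_neg (by omega : ¬ ((i : Int) + arr.getD i 0 < 0))]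
    simp only [Int.toNat_natCast]
    rw [min_eq_left (by omega : i ≤ arr.length)]
    congr 1
    have h2 : i + 1 ≤ ((i : Int) + arr.getD i 0).toNat := by omega
    omega
  · refine ⟨((arr.length : Int) + ((i : Int) + arr.getD i 0)).toNat - i - 1, ?_⟩
    simp only [PySem.List.slice, PySem.List.clampIdx]
    rw [if_neg (by omega : ¬ ((i : Int) < 0)), if_pos hneg,
      if_neg (by omega : ¬ ((arr.length : Int) + ((i : Int) + arr.getD i 0) < 0))]
    simp only [Int.toNat_natCast]
    rw [min_eq_left (by omega : i ≤ arr.length)]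
    congr 1
    have h2 : i + 1 ≤ ((arr.length : Int) + ((i : Int) + arr.getD i 0)).toNat := by omega
    omega

lemma pv_self_mem_slice (arr : List Int) (i : Nat) (hi : i < arr.length) (hc : pvCond arr i) :
    arr[i] ∈ PySem.List.slice arr (some (i : Int)) (some ((i : Int) + arr.getD i 0)) := by
  obtain ⟨k, hk⟩ := pv_slice_shape arr i hi hc
  rw [hk, List.drop_eq_getElem_cons hi, List.take_succ_cons]
  apply List.mem_cons_self

-- A's loop body at a non-trigger index does not return False.
lemma pv_step_le (arr : List Int) (a : Nat) (ha : a < arr.length) (hnt : ¬ pvTrig arr a) :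
    ¬ (PySem.List.len arr - 1 <
      ((PySem.List.max? (PySem.List.slice arr (some (a : Int))
          (some ((a : Int) + PySem.List.pyGetD arr (a : Int) 0))) (fun x => x)).getD 0)) := by
  intro hlt
  rw [PySem.List.pyGetD_natCast] at hlt
  cases hmx : PySem.List.max? (PySem.List.slice arr (some (a : Int))
      (some ((a : Int) + arr.getD a 0))) (fun x => x) with
  | none =>
    rw [hmx] at hlt
    simp only [Option.getD_none, PySem.List.len_eq] at hlt
    omega
  | some m =>
    rw [hmx] at hlt
    simp only [Option.getD_some, PySem.List.len_eq] at hlt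
    exact hnt ⟨m, PySem.List.max?_mem hmx, hlt⟩

lemma pv_go_true (arr : List Int) (hno : ∀ i : Nat, i < arr.length → ¬ pvTrig arr i) :
    ∀ m a : Nat, arr.length ≤ a + m →
      funcGo arr (PySem.List.len arr) (PySem.List.pyRange (a : Int) (PySem.List.len arr) 1) = true := by
  intro m
  induction m with
  | zero =>
    intro a hle
    rw [PySem.List.pyRange_one_eq_nil (by simp only [PySem.List.len_eq]; omega)]
    rfl
  | succ m ih =>
    intro a hle
    by_cases ha : arr.length ≤ a
    · rw [PySem.List.pyRange_one_eq_nil (by simp only [PySem.List.len_eq]; omega)]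
      rfl
    · rw [not_le] at ha
      rw [PySem.List.pyRange_one_cons (by simp only [PySem.List.len_eq]; omega)]
      simp only [funcGo, gt_iff_lt]
      rw [if_neg (pv_step_le arr a ha (hno a ha))]
      rw [show ((a : Int) + 1) = (((a + 1 : Nat) : Int)) by push_cast; ring]
      exact ih (a + 1) (by omega)

lemma pv_go_false (arr : List Int) (j0 : Nat) (hj0 : j0 < arr.length) (ht : pvTrig arr j0)
    (hmin : ∀ i : Nat, i < j0 → ¬ pvTrig arr i) :
    ∀ m a : Nat, j0 ≤ a + m → a ≤ j0 →
      funcGo arr (PySem.List.len arr) (PySem.List.pyRange (a : Int) (PySem.List.len arr) 1) = false := by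
  have hhit : funcGo arr (PySem.List.len arr) (PySem.List.pyRange (j0 : Int) (PySem.List.len arr) 1) = false := by
    obtain ⟨x, hxs, hxlt⟩ := ht
    rw [PySem.List.pyRange_one_cons (by simp only [PySem.List.len_eq]; omega)]
    simp only [funcGo, gt_iff_lt]
    rw [if_pos]
    rw [PySem.List.pyGetD_natCast]
    cases hmx : PySem.List.max? (PySem.List.slice arr (some (j0 : Int))
        (some ((j0 : Int) + arr.getD j0 0))) (fun x => x) with
    | none =>
      rw [PySem.List.max?_eq_none_iff] at hmx
      exact absurd hmx (List.ne_nil_of_mem hxs)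
    | some m =>
      have hxm := PySem.List.max?_isMax hmx x hxs
      simp only [Option.getD_some, PySem.List.len_eq]
      omega
  intro m
  induction m with
  | zero =>
    intro a h1 h2
    have : a = j0 := by omega
    rw [this]
    exact hhit
  | succ m ih =>
    intro a h1 h2
    rcases eq_or_lt_of_le h2 with heq | hlt
    · rw [heq]; exact hhit
    · rw [PySem.List.pyRange_one_cons (by simp only [PySem.List.len_eq]; omega)]
      simp only [funcGo, gt_iff_lt]
      rw [if_neg (pv_step_le arr a (lt_trans hlt hj0) (hmin a hlt))]
      rw [show ((a : Int) + 1) = (((a + 1 : Nat) : Int)) by push_cast; ring]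
      exact ih (a + 1) (by omega) (by omega)

-- ===== VERDICT (by name: the statement is the Claim_ definition above) =====
theorem func_spec : Claim_equal_func := by
  unfold Claim_equal_func
  intro arr _ hpre
  unfold Spec_func func func_alt
  by_cases hex : ∃ j, j < arr.length ∧ pvTrig arr j
  · obtain ⟨hj0len, hj0t⟩ := Nat.find_spec hex
    have hmin : ∀ i, i < Nat.find hex → ¬ pvTrig arr i := fun i hi ht =>
      Nat.find_min hex hi ⟨lt_trans hi hj0len, ht⟩
    have hA := pv_go_false arr (Nat.find hex) hj0len hj0t hmin (Nat.find hex) 0 (by omega) (by omega)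
    rw [show (((0 : Nat) : Int)) = (0 : Int) by simp] at hA
    rw [hA]
    obtain ⟨x, hxs, hxlt⟩ := hj0t
    symm
    refine List.all_eq_false.mpr ⟨x, PySem.List.mem_of_mem_slice _ _ _ hxs, ?_⟩
    simp only [PySem.List.len_eq, decide_eq_true_eq]
    omega
  · have hno : ∀ i, i < arr.length → ¬ pvTrig arr i := fun i hi ht => hex ⟨i, hi, ht⟩
    have hA := pv_go_true arr hno arr.length 0 (by omega)
    rw [show (((0 : Nat) : Int)) = (0 : Int) by simp] at hA
    rw [hA]
    symm
    rw [List.all_eq_true]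
    intro x hx
    obtain ⟨i, hi, rfl⟩ := List.mem_iff_getElem.mp hx
    have hcond : pvCond arr i := by
      rcases hpre i hi with h | ⟨j, hj, ht⟩
      · exact h
      · exact absurd ht (hno j (lt_trans hj hi))
    have hmem := pv_self_mem_slice arr i hi hcond
    have hnt : ¬ ((arr.length : Int) - 1 < arr[i]) := fun hlt => hno i hi ⟨arr[i], hmem, hlt⟩
    simp only [PySem.List.len_eq, decide_eq_true_eq]
    omega
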